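-- pv_equiv track=rewrite | github.com/AhmetSah13/PlanDraw | backend/app/importers/dxf_importer.py | _split_entities
-- ===== SOURCE A (Python) =====
-- def _split_entities(pairs: list[tuple[int, str]]) -> list[tuple[str, list[tuple[int, str]]]]:
--     """ENTITIES bölümünde her 0 <type> ile başlayan entity'yi (type, pairs) olarak ayır."""
--     entities: list[tuple[str, list[tuple[int, str]]]] = []
--     i = 0
--     while i < len(pairs):
--         code, value = pairs[i]
--         if code != 0:
--             i += 1
--             continue
--         etype = value.strip().upper()
--         i += 1
--         entity_pairs: list[tuple[int, str]] = []
--         while i < len(pairs) and pairs[i][0] != 0: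
--             entity_pairs.append(pairs[i])
--             i += 1
--         entities.append((etype, entity_pairs))
--     return entities
-- ===== SOURCE B (Python) =====
-- def _split_entities(pairs: list[tuple[int, str]]) -> list[tuple[str, list[tuple[int, str]]]]:
--     """ENTITIES bölümünde her 0 <type> ile başlayan entity'yi (type, pairs) olarak ayır."""
--     entities: list[tuple[str, list[tuple[int, str]]]] = []
--     current = None
--     for code, value in pairs:
--         if code == 0:
--             current = []
--             entities.append((value.strip().upper(), current))
--         elif current is not None:
--             current.append((code, value))
--     return entities
-- ===== Notes on version B (the rewrite author's own statement) =====
-- stated objective: simpler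
-- what changed: Replaces A's index-driven outer while with a nested inner while (two loop levels and manual i bookkeeping) by one flat for loop that keeps a reference to the current entity's pair list and appends into it, flushing via the entities list itself.
import Mathlib
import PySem

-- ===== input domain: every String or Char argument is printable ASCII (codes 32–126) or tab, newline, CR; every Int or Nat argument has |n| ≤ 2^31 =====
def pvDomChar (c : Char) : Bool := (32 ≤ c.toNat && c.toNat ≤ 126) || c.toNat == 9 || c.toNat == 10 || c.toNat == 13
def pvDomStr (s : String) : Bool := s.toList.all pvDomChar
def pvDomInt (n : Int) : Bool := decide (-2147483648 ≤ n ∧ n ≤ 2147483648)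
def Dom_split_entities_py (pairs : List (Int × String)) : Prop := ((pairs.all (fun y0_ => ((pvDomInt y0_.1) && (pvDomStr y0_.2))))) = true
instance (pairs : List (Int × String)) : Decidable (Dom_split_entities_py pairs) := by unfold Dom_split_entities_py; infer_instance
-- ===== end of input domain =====

-- B replaces A's index-driven outer-while + inner-while with one flat for loop keeping the
-- current entity's pair list; same return value, objective: simpler decomposition.


-- ===== PORT A =====
-- value.strip().upper()
def pvNorm (s : String) : String := PySem.Str.upper (PySem.Str.strip s)

-- A's inner while (collect entity_pairs until the next code-0 marker) together with the
-- continuation of the outer while once a marker has been seen: on a non-0 pair append it to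
-- entity_pairs (acc); on a 0 pair emit the finished (etype, entity_pairs) and start the next
-- entity, exactly as A's loop does; at the end emit the pending entity.
def pvInnerA (t : String) (acc : List (Int × String)) :
    List (Int × String) → List (String × List (Int × String))
  | [] => [(t, acc)]
  | (c, v) :: rest =>
    if c ≠ 0 then pvInnerA t (acc ++ [(c, v)]) rest
    else (t, acc) :: pvInnerA (pvNorm v) [] rest

-- A's outer while before the first code-0 marker: skip pairs (i += 1; continue) until one
def split_entities_py : List (Int × String) → List (String × (List (Int × String)))
  | [] => []
  | (code, value) :: rest =>
    if code ≠ 0 then split_entities_py rest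
    else pvInnerA (pvNorm value) [] rest

-- ===== PORT B =====
-- B's loop state: (finished entities, current entity or none); appending a pair to the
-- current list models Python's mutation through the `current` alias.
def pvStepB (st : (List (String × List (Int × String))) × Option (String × List (Int × String)))
    (p : Int × String) :
    (List (String × List (Int × String))) × Option (String × List (Int × String)) :=
  if p.1 = 0 then (st.1 ++ st.2.toList, some (pvNorm p.2, []))
  else (st.1, st.2.map (fun e => (e.1, e.2 ++ [p])))

def split_entities_py_alt (pairs : List (Int × String)) : List (String × (List (Int × String))) :=
  let st := pairs.foldl pvStepB ([], none)
  st.1 ++ st.2.toList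

-- ===== PRECONDITION & SPEC =====
def Spec_split_entities_py (pairs : List (Int × String)) (out : List (String × (List (Int × String)))) : Prop := out = split_entities_py_alt pairs
instance (pairs : List (Int × String)) (out : List (String × (List (Int × String)))) : Decidable (Spec_split_entities_py pairs out) := by unfold Spec_split_entities_py; infer_instance

-- ===== CLAIM (what is proved, stated in full; the proofs are below) =====
def Claim_equal_split_entities_py : Prop := ∀ (pairs : List (Int × String)), Dom_split_entities_py pairs → Spec_split_entities_py pairs (split_entities_py pairs)

-- ===== LEMMAS AND PROOFS =====

-- the finished prefix only accumulates: factor it out of the fold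
theorem pvFold_done (l : List (Int × String)) (d : List (String × List (Int × String)))
    (cur : Option (String × List (Int × String))) :
    l.foldl pvStepB (d, cur) =
      (d ++ (l.foldl pvStepB ([], cur)).1, (l.foldl pvStepB ([], cur)).2) := by
  induction l generalizing d cur with
  | nil => simp
  | cons p rest ih =>
    simp only [List.foldl_cons, pvStepB]
    split
    · rw [ih (d ++ cur.toList), ih ([] ++ cur.toList)]; simp
    · rw [ih d, ih []]

-- B's fold with a live current entity computes A's inner loop
theorem pvFold_inner (l : List (Int × String)) (t : String) (e : List (Int × String)) :
    (let st := l.foldl pvStepB ([], some (t, e)); st.1 ++ st.2.toList) = pvInnerA t e l := by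
  induction l generalizing t e with
  | nil => simp [pvInnerA]
  | cons p rest ih =>
    obtain ⟨c, v⟩ := p
    by_cases h : c = 0
    · subst h
      simp only [List.foldl_cons, pvStepB]
      rw [pvFold_done]
      have := ih (pvNorm v) []
      simp only at this
      simp [this, pvInnerA]
    · simp only [List.foldl_cons, pvStepB, if_neg h, Option.map_some]
      have := ih t (e ++ [(c, v)])
      simp only at this
      simp [this, pvInnerA, h]

-- B's fold with no current entity computes A's outer skip loop
theorem pvFold_outer (l : List (Int × String)) :
    (let st := l.foldl pvStepB (([] : List (String × List (Int × String))), none);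
      st.1 ++ st.2.toList) = split_entities_py l := by
  induction l with
  | nil => simp [split_entities_py]
  | cons p rest ih =>
    obtain ⟨c, v⟩ := p
    by_cases h : c = 0
    · subst h
      simp only [List.foldl_cons, pvStepB]
      rw [pvFold_done]
      have := pvFold_inner rest (pvNorm v) []
      simp only at this
      simp [this, split_entities_py]
    · simp only [List.foldl_cons, pvStepB, if_neg h, Option.map_none]
      simp only at ih
      simp [ih, split_entities_py, h]

-- ===== VERDICT (by name: the statement is the Claim_ definition above) =====
theorem split_entities_py_spec : Claim_equal_split_entities_py := by
  intro pairs _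
  unfold Spec_split_entities_py split_entities_py_alt
  exact (pvFold_outer pairs).symm
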